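-- pv_equiv track=rewrite | github.com/Fabianstw/Puzzles | AOC/Y24/25/py1.py | get_lock_heights
-- ===== SOURCE A (Python) =====
-- def get_lock_heights(locks):
-- 	heights = []
-- 	for lock in locks:
-- 		lock_heights = []
-- 		for i in range(len(lock[0])):
-- 			h = -1
-- 			for j in range(len(lock)):
-- 				if lock[j][i] == "#":
-- 					h += 1
-- 				else:
-- 					break
-- 			lock_heights.append(h)
-- 		heights.append(lock_heights)
-- 	return heights
-- ===== SOURCE B (Python) =====
-- def get_lock_heights(locks):
--     heights = []
--     for lock in locks:
--         n = len(lock[0])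
--         hs = [-1] * n
--         active = [True] * n
--         for row in lock:
--             for i in range(n):
--                 if active[i]:
--                     if row[i] == '#':
--                         hs[i] += 1
--                     else:
--                         active[i] = False
--         heights.append(hs)
--     return heights
-- ===== Notes on version B (the rewrite author's own statement) =====
-- stated objective: alternative
-- what changed: B makes a single row-major streaming pass over each lock, maintaining per-column running heights and per-column active flags that are switched off at the first non-'#' cell, instead of A's column-major rescans that walk down every column from the top with a break.
import Mathlib
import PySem

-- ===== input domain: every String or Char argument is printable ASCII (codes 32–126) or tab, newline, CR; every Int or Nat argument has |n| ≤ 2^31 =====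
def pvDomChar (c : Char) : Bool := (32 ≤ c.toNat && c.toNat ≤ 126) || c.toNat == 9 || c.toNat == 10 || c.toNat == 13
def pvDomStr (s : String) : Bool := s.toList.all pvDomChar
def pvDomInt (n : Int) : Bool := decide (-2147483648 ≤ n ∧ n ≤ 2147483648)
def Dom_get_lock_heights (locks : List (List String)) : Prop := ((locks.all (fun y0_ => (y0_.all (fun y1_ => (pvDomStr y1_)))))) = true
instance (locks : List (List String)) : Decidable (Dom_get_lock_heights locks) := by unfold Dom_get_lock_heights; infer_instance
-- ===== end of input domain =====

-- B replaces A's column-major per-column top-down scans (with break) by a single row-major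
-- streaming pass keeping per-column running heights and active flags; alternative
-- decomposition, same cost. Return-value equivalence only; neither mutates its argument.

-- ===== PORT A =====
-- inner 'for j in range(len(lock))' loop with its break: structural recursion over the rows;
-- the 'none' arm is Python's IndexError (excluded by Pre_)
def pvCountCol (rows : List String) (i : Nat) (h : Int) : Int :=
  match rows with
  | [] => h
  | r :: rest =>
    match PySem.Str.pyGet? r (i : Int) with
    | some c => if c = '#' then pvCountCol rest i (h + 1) else h
    | none => h

-- 'lock[0]' raises on an empty lock in Python (excluded by Pre_); headI is its total stand-in
def get_lock_heights (locks : List (List String)) : List (List Int) :=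
  locks.map (fun lock =>
    (List.range lock.headI.length).map (fun i => pvCountCol lock i (-1)))

-- ===== PORT B =====
-- the inner 'for i in range(n)' pass of one row over the state lists (hs, active), kept as a
-- single list of (height, active) pairs; the 'none' arm is Python's IndexError (excluded by
-- Pre_), rendered as the 'else' branch (deactivate) to keep the port total
def pvRowStep (row : String) (st : List (Int × Bool)) : List (Int × Bool) :=
  st.zipIdx.map (fun p =>
    if p.1.2 then
      match PySem.Str.pyGet? row (p.2 : Int) with
      | some c => if c = '#' then (p.1.1 + 1, true) else (p.1.1, false)
      | none => (p.1.1, false)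
    else p.1)

def get_lock_heights_alt (locks : List (List String)) : List (List Int) :=
  locks.map (fun lock =>
    ((lock.foldl (fun st row => pvRowStep row st)
        (List.replicate lock.headI.length (-1, true))).map Prod.fst))

-- ===== PRECONDITION & SPEC =====
def pvCharAt (rows : List String) (j i : Nat) : Option Char :=
  (rows[j]?).bind (fun r => PySem.Str.pyGet? r (i : Int))

-- column i of the lock never runs off the end of a row before the scan breaks: every cell
-- of the column that is out of range is preceded by a non-'#' cell
def pvOkCol (lock : List String) (i : Nat) : Bool :=
  (List.range lock.length).all (fun j =>
    match pvCharAt lock j i with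
    | some _ => true
    | none => (List.range j).any (fun k => decide (pvCharAt lock k i ≠ some '#')))

-- Pre_ excludes exactly the inputs on which BOTH Pythons raise IndexError: an empty lock
-- (lock[0]), or a ragged lock whose column scan reaches a cell past the end of a short row.
def Pre_get_lock_heights (locks : List (List String)) : Prop :=
  (locks.all (fun lock =>
    !lock.isEmpty && (List.range lock.headI.length).all (fun i => pvOkCol lock i))) = true

instance (locks : List (List String)) : Decidable (Pre_get_lock_heights locks) := by
  unfold Pre_get_lock_heights; infer_instance

def pvWitness_get_lock_heights : List (List String) := [["##", ".."], ["#"]]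

def Spec_get_lock_heights (locks : List (List String)) (out : List (List Int)) : Prop := out = get_lock_heights_alt locks
instance (locks : List (List String)) (out : List (List Int)) : Decidable (Spec_get_lock_heights locks out) := by unfold Spec_get_lock_heights; infer_instance

-- ===== CLAIM (what is proved, stated in full; the proofs are below) =====
def Claim_equal_get_lock_heights : Prop := ∀ (locks : List (List String)), Dom_get_lock_heights locks → Pre_get_lock_heights locks → Spec_get_lock_heights locks (get_lock_heights locks)

-- ===== LEMMAS AND PROOFS =====

-- one cell's effect on one column's (height, active) state, as B's row pass applies it
def pvStep1 (c : Option Char) (s : Int × Bool) : Int × Bool :=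
  if s.2 then
    match c with
    | some ch => if ch = '#' then (s.1 + 1, true) else (s.1, false)
    | none => (s.1, false)
  else s

theorem zipIdx_map_range (n : Nat) (g : Nat → Int × Bool) :
    ((List.range n).map g).zipIdx = (List.range n).map (fun (i : Nat) => (g i, i)) := by
  apply List.ext_getElem
  · simp
  · intro i h1 h2
    simp

theorem pvRowStep_map_range (row : String) (n : Nat) (g : Nat → Int × Bool) :
    pvRowStep row ((List.range n).map g)
      = (List.range n).map (fun (i : Nat) => pvStep1 (PySem.Str.pyGet? row (i : Int)) (g i)) := by
  unfold pvRowStep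
  rw [zipIdx_map_range, List.map_map]
  apply List.map_congr_left
  intro i _
  simp [pvStep1]

theorem foldl_rows_cols (rows : List String) (n : Nat) (g : Nat → Int × Bool) :
    rows.foldl (fun st row => pvRowStep row st) ((List.range n).map g)
      = (List.range n).map (fun (i : Nat) =>
          (rows.map (fun r => PySem.Str.pyGet? r (i : Int))).foldl
            (fun s c => pvStep1 c s) (g i)) := by
  induction rows generalizing g with
  | nil => simp
  | cons row rest ih =>
    simp only [List.foldl_cons, List.map_cons]
    rw [pvRowStep_map_range, ih]

theorem foldl_step1_frozen (cells : List (Option Char)) (h : Int) :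
    (cells.foldl (fun s c => pvStep1 c s) (h, false)).1 = h := by
  induction cells with
  | nil => rfl
  | cons c rest ih => simpa [pvStep1] using ih

theorem pvCountCol_cons (r : String) (rest : List String) (i : Nat) (h : Int) :
    pvCountCol (r :: rest) i h
      = match PySem.Str.pyGet? r (i : Int) with
        | some c => if c = '#' then pvCountCol rest i (h + 1) else h
        | none => h := rfl

theorem foldl_step1_count (rows : List String) (i : Nat) (h : Int) :
    ((rows.map (fun r => PySem.Str.pyGet? r (i : Int))).foldl
        (fun s c => pvStep1 c s) (h, true)).1 = pvCountCol rows i h := by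
  induction rows generalizing h with
  | nil => rfl
  | cons r rest ih =>
    rw [List.map_cons, List.foldl_cons, pvCountCol_cons]
    cases hc : PySem.Str.pyGet? r (i : Int) with
    | none =>
      simpa [pvStep1] using foldl_step1_frozen (rest.map (fun r => PySem.Str.pyGet? r (i : Int))) h
    | some c =>
      by_cases hch : c = '#'
      · subst hch
        simpa [pvStep1] using ih (h + 1)
      · simpa [pvStep1, hch] using
          foldl_step1_frozen (rest.map (fun r => PySem.Str.pyGet? r (i : Int))) h

-- ===== VERDICT (by name: the statement is the Claim_ definition above) =====
theorem get_lock_heights_spec : Claim_equal_get_lock_heights := by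
  intro locks _ _
  unfold Spec_get_lock_heights get_lock_heights get_lock_heights_alt
  apply List.map_congr_left
  intro lock _
  have hrep : List.replicate lock.headI.length ((-1 : Int), true)
      = (List.range lock.headI.length).map (fun _ => ((-1 : Int), true)) := by
    simp
  rw [hrep, foldl_rows_cols, List.map_map]
  apply List.map_congr_left
  intro i _
  simpa using (foldl_step1_count lock i (-1)).symm
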